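-- pv_equiv track=rewrite | github.com/mohammadshaad/sdot-codes | MinimumDeletionsToMakeArraysDivisible.py | min_operation
-- ===== SOURCE A (Python) =====
-- def min_operation(nums, nums_divide):
--     g = nums_divide[0]
--     for i in nums_divide:
--         g = gcd(g, i)
--     smallest = float('inf')
--     for num in nums:
--         if g % num == 0:
--             smallest = min(smallest, num)
--     if smallest == float('inf'):
--         return '-1'
--
--     min_op = 0
--     for num in nums:
--         if num > smallest:
--             min_op += 2
--     return str(min_op)
--
-- def gcd(a, b):
--     if b == 0:
--         return a
--     return gcd(b, a % b)
-- ===== SOURCE B (Python) =====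
-- def gcd(a, b):
--     if b == 0:
--         return a
--     return gcd(b, a % b)
--
-- def min_operation(nums, nums_divide):
--     g = nums_divide[0]
--     for d in nums_divide:
--         g = gcd(g, d)
--     s = sorted(nums)
--     for v in s:
--         if g % v == 0:
--             cnt = 0
--             for x in reversed(s):
--                 if x <= v:
--                     break
--                 cnt += 1
--             return str(2 * cnt)
--     return '-1'
-- ===== Notes on version B (the rewrite author's own statement) =====
-- stated objective: alternative
-- what changed: A's two full passes (running-min over the divisors of g with an inf sentinel, then a second pass counting elements greater than the min) are replaced by sort-then-scan: sort nums, return at the FIRST divisor met in sorted order (it is the minimum), counting the strictly-greater elements by scanning the sorted list from the back until a value <= it appears.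
-- outside the precondition, e.g. on min_operation([2, 4], []): A raises IndexError, B raises IndexError; on min_operation([0, 3], [6]): A raises ZeroDivisionError, B raises ZeroDivisionError
import Mathlib
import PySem

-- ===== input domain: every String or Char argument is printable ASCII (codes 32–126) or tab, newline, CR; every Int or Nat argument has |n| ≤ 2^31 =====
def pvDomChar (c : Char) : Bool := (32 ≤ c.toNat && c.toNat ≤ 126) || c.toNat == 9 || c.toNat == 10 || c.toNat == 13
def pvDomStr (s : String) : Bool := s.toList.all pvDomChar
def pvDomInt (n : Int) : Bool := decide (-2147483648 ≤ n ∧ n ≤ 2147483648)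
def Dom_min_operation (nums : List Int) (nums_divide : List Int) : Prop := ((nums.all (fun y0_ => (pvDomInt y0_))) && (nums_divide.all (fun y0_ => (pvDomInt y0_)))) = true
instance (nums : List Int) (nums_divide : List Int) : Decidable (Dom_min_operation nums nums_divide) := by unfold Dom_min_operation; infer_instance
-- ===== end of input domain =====

-- B replaces A's two full scans (min-accumulator over divisors, then a count pass)
-- by sort-then-scan: sort nums, return on the FIRST divisor found, and count the
-- strictly-greater elements from the end of the sorted list. Objective: alternative.


-- ===== PORT A =====
-- termination measure for the recursive Python gcd: |a % b| shrinks (b ≠ 0)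
theorem pyGcd_dec (a b : Int) (h : ¬ b = 0) : (PySem.Int.mod a b).natAbs < b.natAbs := by
  rcases lt_or_gt_of_ne h with hb | hb
  · have := PySem.Int.mod_neg_bounds a hb; omega
  · have h1 := PySem.Int.mod_nonneg a hb
    have h2 := PySem.Int.mod_lt a hb; omega

-- def gcd(a, b): if b == 0: return a; return gcd(b, a % b)   (shared: Source B has the identical helper)
def pyGcd (a b : Int) : Int :=
  if h : b = 0 then a else pyGcd b (PySem.Int.mod a b)
termination_by b.natAbs
decreasing_by exact pyGcd_dec a b h

-- literal port of A; float('inf') sentinel is ported as Option.none (exact: min(inf, num) = num,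
-- and smallest == inf iff no assignment happened)
def min_operation (nums : List Int) (nums_divide : List Int) : String :=
  let g0 := (PySem.List.pyGet? nums_divide 0).getD 0
  let g := nums_divide.foldl (fun g i => pyGcd g i) g0
  let smallest : Option Int := nums.foldl (fun s num =>
      if PySem.Int.mod g num = 0 then
        match s with
        | none => some num
        | some x => some (min x num)
      else s) none
  match smallest with
  | none => "-1"
  | some m =>
      let min_op := nums.foldl (fun acc num => if num > m then acc + 2 else acc) (0 : Int)
      PySem.Int.toStr min_op

-- ===== PORT B =====
-- inner loop of Source B: cnt over reversed(s), breaking at the first x <= v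
def bCount (v : Int) : List Int → Int
  | [] => 0
  | x :: rest => if x ≤ v then 0 else bCount v rest + 1

-- outer loop of Source B: first v in sorted list with g % v == 0 returns immediately
def bScan (g : Int) (s : List Int) : List Int → String
  | [] => "-1"
  | v :: rest =>
      if PySem.Int.mod g v = 0 then PySem.Int.toStr (2 * bCount v s.reverse)
      else bScan g s rest

def min_operation_alt (nums : List Int) (nums_divide : List Int) : String :=
  let g0 := (PySem.List.pyGet? nums_divide 0).getD 0
  let g := nums_divide.foldl (fun g d => pyGcd g d) g0
  let s := PySem.List.sorted nums (fun x => x) false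
  bScan g s s

-- ===== PRECONDITION & SPEC =====
-- Pre_ excludes exactly the raising inputs: empty nums_divide (IndexError on nums_divide[0])
-- and a 0 in nums (ZeroDivisionError on g % num).
def Pre_min_operation (nums : List Int) (nums_divide : List Int) : Prop :=
  nums_divide ≠ [] ∧ (0 : Int) ∉ nums
instance (nums : List Int) (nums_divide : List Int) : Decidable (Pre_min_operation nums nums_divide) := by unfold Pre_min_operation; infer_instance
def pvWitness_min_operation : List Int × List Int := ([4, 2, 6], [6, 12])

def Spec_min_operation (nums : List Int) (nums_divide : List Int) (out : String) : Prop := out = min_operation_alt nums nums_divide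
instance (nums : List Int) (nums_divide : List Int) (out : String) : Decidable (Spec_min_operation nums nums_divide out) := by unfold Spec_min_operation; infer_instance

-- ===== CLAIM (what is proved, stated in full; the proofs are below) =====
def Claim_equal_min_operation : Prop := ∀ (nums : List Int) (nums_divide : List Int), Dom_min_operation nums nums_divide → Pre_min_operation nums nums_divide → Spec_min_operation nums nums_divide (min_operation nums nums_divide)

-- ===== LEMMAS AND PROOFS =====

-- A's smallest-loop: starting from some a it computes the running min over the divisors
theorem foldA_some (g : Int) (l : List Int) (a : Int) :
    l.foldl (fun s num =>
      if PySem.Int.mod g num = 0 then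
        match s with
        | none => some num
        | some x => some (min x num)
      else s) (some a)
    = some ((l.filter (fun v => PySem.Int.mod g v = 0)).foldl min a) := by
  induction l generalizing a with
  | nil => simp
  | cons x t ih =>
      by_cases hx : PySem.Int.mod g x = 0 <;> simp [hx, ih]

-- A's smallest-loop from the inf sentinel: none iff no divisor, else the min of the divisors
theorem foldA_none (g : Int) (l : List Int) :
    l.foldl (fun s num =>
      if PySem.Int.mod g num = 0 then
        match s with
        | none => some num
        | some x => some (min x num)
      else s) none
    = match l.filter (fun v => PySem.Int.mod g v = 0) with
      | [] => none
      | a :: t => some (t.foldl min a) := by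
  induction l with
  | nil => simp
  | cons x t ih =>
      by_cases hx : PySem.Int.mod g x = 0
      · simp [hx, foldA_some]
      · simp [hx, ih]

-- foldl min yields a member that is a lower bound
theorem foldl_min_mem (t : List Int) (a : Int) : t.foldl min a ∈ a :: t := by
  induction t generalizing a with
  | nil => simp
  | cons x t ih =>
      simp only [List.foldl_cons]
      rcases List.mem_cons.mp (ih (min a x)) with h1 | h1
      · rcases min_choice a x with hc | hc <;> rw [h1, hc] <;> simp
      · simp [h1]

theorem foldl_min_le (t : List Int) : ∀ (a y : Int), y ∈ a :: t → t.foldl min a ≤ y := by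
  induction t with
  | nil => intro a y hy; simp only [List.mem_singleton] at hy; simp [hy]
  | cons x t ih =>
      intro a y hy
      simp only [List.foldl_cons]
      have hb : List.foldl min (min a x) t ≤ min a x := ih (min a x) _ (by simp)
      rcases List.mem_cons.mp hy with h1 | hy'
      · rw [h1]; exact le_trans hb (min_le_left a x)
      · rcases List.mem_cons.mp hy' with h2 | hy''
        · rw [h2]; exact le_trans hb (min_le_right a x)
        · exact ih (min a x) y (by simp [hy''])

-- A's count-loop computes 2 * (number of elements strictly greater than m)
theorem foldA_count (m : Int) (l : List Int) (acc : Int) :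
    l.foldl (fun acc num => if num > m then acc + 2 else acc) acc
    = acc + 2 * (l.countP (fun x => m < x)) := by
  induction l generalizing acc with
  | nil => simp
  | cons x t ih =>
      by_cases hx : m < x
      · simp [hx, ih]; ring
      · simp [hx, ih]

-- B's inner loop on a nonincreasing list counts ALL elements > v
theorem bCount_eq_countP (v : Int) (l : List Int)
    (h : l.Pairwise (fun a b => b ≤ a)) :
    bCount v l = (l.countP (fun x => v < x) : Int) := by
  induction l with
  | nil => simp [bCount]
  | cons x t ih =>
      rcases List.pairwise_cons.mp h with ⟨hx, ht⟩
      by_cases hxv : x ≤ v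
      · have h0 : t.countP (fun x => v < x) = 0 := by
          rw [List.countP_eq_zero]
          intro y hy
          simp only [decide_eq_true_eq]
          exact not_lt.mpr (le_trans (hx y hy) hxv)
        simp [bCount, hxv, h0, not_lt.mpr hxv]
      · rw [List.countP_cons]
        simp only [bCount, if_neg hxv, not_le.mp hxv, decide_true, ih ht]
        push_cast
        ring

-- B's outer loop: "-1" when no divisor is in l, else the answer at the first divisor
theorem bScan_eq (g : Int) (s : List Int) (l : List Int) :
    bScan g s l
    = match l.filter (fun v => PySem.Int.mod g v = 0) with
      | [] => "-1"
      | v :: _ => PySem.Int.toStr (2 * bCount v s.reverse) := by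
  induction l with
  | nil => simp [bScan]
  | cons x t ih =>
      by_cases hx : PySem.Int.mod g x = 0 <;> simp [bScan, hx, ih]

-- ===== VERDICT (by name: the statement is the Claim_ definition above) =====
theorem min_operation_spec : Claim_equal_min_operation := by
  intro nums nums_divide _ _
  unfold Spec_min_operation min_operation min_operation_alt
  dsimp only
  set g := nums_divide.foldl (fun g i => pyGcd g i) ((PySem.List.pyGet? nums_divide 0).getD 0) with hg
  set s := PySem.List.sorted nums (fun x => x) false with hs
  have hperm : s.Perm nums := PySem.List.sorted_perm nums (fun x => x) false
  have hpair : s.Pairwise (fun a b : Int => a ≤ b) := PySem.List.sorted_pairwise nums (fun x => x)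
  have hfperm : (s.filter (fun v => PySem.Int.mod g v = 0)).Perm
      (nums.filter (fun v => PySem.Int.mod g v = 0)) := hperm.filter _
  rw [foldA_none, bScan_eq]
  rcases hS : s.filter (fun v => PySem.Int.mod g v = 0) with _ | ⟨v, tS⟩
  · rw [hS] at hfperm
    have hN : nums.filter (fun v => PySem.Int.mod g v = 0) = [] := hfperm.symm.eq_nil
    rw [hN]
  · rw [hS] at hfperm
    rcases hN : nums.filter (fun v => PySem.Int.mod g v = 0) with _ | ⟨a, tN⟩
    · rw [hN] at hfperm
      exact absurd hfperm.length_eq (by simp)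
    · rw [hN] at hfperm
      dsimp only
      -- the first divisor in sorted order equals the running min of A's divisors
      have hfpair : (v :: tS).Pairwise (fun a b : Int => a ≤ b) := by
        have := hpair.filter (fun v => decide (PySem.Int.mod g v = 0))
        rwa [show List.filter (fun v => decide (PySem.Int.mod g v = 0)) s
              = v :: tS from hS] at this
      have hmem_min : tN.foldl min a ∈ v :: tS :=
        hfperm.mem_iff.mpr (foldl_min_mem tN a)
      have hv_le : ∀ y ∈ v :: tS, v ≤ y := by
        intro y hy
        rcases List.mem_cons.mp hy with rfl | hy
        · exact le_refl _
        · exact (List.pairwise_cons.mp hfpair).1 y hy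
      have hv_mem : v ∈ a :: tN := hfperm.mem_iff.mp (by simp)
      have hmv : tN.foldl min a = v :=
        le_antisymm (foldl_min_le tN a v hv_mem) (hv_le _ hmem_min)
      -- the two counts agree
      have hcnt : bCount v s.reverse = (nums.countP (fun x => v < x) : Int) := by
        rw [bCount_eq_countP v s.reverse (by simpa using hpair.reverse)]
        congr 1
        rw [List.countP_reverse]
        exact hperm.countP_eq _
      rw [foldA_count, hmv, hcnt]
      congr 1
      ring
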